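-- pv_equiv track=rewrite | github.com/pypi-data/pypi-mirror-386 | packages/FlexibleDate/flexibledate-1.0.9.tar.gz/flexibledate-1.0.9/FlexibleDate/FlexibleDate.py | _get_strings_and_instances
-- ===== SOURCE A (Python) =====
-- def _get_strings_and_instances(strings:list[str]) -> list[tuple[str, int]]:
--     """Gets the strings and instances.
--
--     Args:
--         strings (list): input string
--
--     Returns:
--         list[tuple[str, int]]: the list of strings and instances
--     """
--     count_dict = {}
--     result = []
--     for string in strings:
--         if count_dict.get(string) is None:
--             count_dict[string] = 0
--         count_dict[string] += 1
--         result.append((string, count_dict[string] - 1))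
--     return result
-- ===== SOURCE B (Python) =====
-- def _get_strings_and_instances(strings: list[str]) -> list[tuple[str, int]]:
--     """Group positions by value, rank each occurrence within its group,
--     then restore original order by sorting on position."""
--     groups = {}
--     for i, s in enumerate(strings):
--         groups.setdefault(s, []).append(i)
--     tagged = []
--     for s in groups:
--         for k, i in enumerate(groups[s]):
--             tagged.append((i, s, k))
--     tagged.sort(key=lambda t: t[0])
--     return [(s, k) for _, s, k in tagged]
-- ===== Notes on version B (the rewrite author's own statement) =====
-- stated objective: alternative
-- what changed: B replaces A's single pass with a running-count dictionary by a group-rank-resort scheme: it groups the positions of each distinct string, numbers the occurrences within each group, and sorts the tagged triples back into positional order.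
import Mathlib
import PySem

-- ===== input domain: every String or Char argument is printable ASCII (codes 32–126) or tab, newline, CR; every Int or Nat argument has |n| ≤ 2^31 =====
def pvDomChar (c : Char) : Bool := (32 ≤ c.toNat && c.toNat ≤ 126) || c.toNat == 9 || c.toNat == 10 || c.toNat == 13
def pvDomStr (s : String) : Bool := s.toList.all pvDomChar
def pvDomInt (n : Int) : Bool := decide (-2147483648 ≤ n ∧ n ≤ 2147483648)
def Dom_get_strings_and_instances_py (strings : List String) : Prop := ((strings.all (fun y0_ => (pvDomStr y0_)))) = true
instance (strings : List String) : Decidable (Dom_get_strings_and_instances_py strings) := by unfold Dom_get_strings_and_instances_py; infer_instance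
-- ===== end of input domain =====

-- B replaces A's one-pass running-count dictionary by a group-rank-resort scheme
-- (positions grouped per distinct string, ranked within each group, sorted back
-- by position); a genuinely different algorithm, not faster.

-- ===== PORT A =====
def get_strings_and_instances_py (strings : List String) : List (String × Int) :=
  (strings.foldl
    (fun (st : PySem.Dict String Int × List (String × Int)) s =>
      let d0 := st.1
      let d1 := if (d0.get? s).isNone then d0.insert s 0 else d0   -- if count_dict.get(string) is None: count_dict[string] = 0
      let d2 := d1.insert s (d1.getD s 0 + 1)                      -- count_dict[string] += 1
      (d2, st.2 ++ [(s, d2.getD s 0 - 1)]))                        -- result.append((string, count_dict[string] - 1))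
    (PySem.Dict.empty, [])).2

-- ===== PORT B =====
def get_strings_and_instances_py_alt (strings : List String) : List (String × Int) :=
  -- groups = {}; for i, s in enumerate(strings): groups.setdefault(s, []).append(i)
  let groups : PySem.Dict String (List Int) :=
    (PySem.List.enumerate strings).foldl
      (fun d p => d.modify p.2 [] (fun ps => ps ++ [p.1]))   -- setdefault+append = modify with default []
      PySem.Dict.empty
  -- for s in groups: for k, i in enumerate(groups[s]): tagged.append((i, s, k))
  let tagged : List (Int × String × Int) :=
    groups.keys.foldl
      (fun (acc : List (Int × String × Int)) s =>
        ((PySem.List.enumerate (groups.getD s [])).foldl (fun a q => a ++ [(q.2, s, q.1)]) acc))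
      []   -- groups[s]: s ranges over groups' keys, so the lookup never misses; getD [] is exact here
  -- tagged.sort(key=lambda t: t[0])
  let sortedT := PySem.List.sorted tagged (fun t => t.1)
  -- [(s, k) for _, s, k in tagged]
  sortedT.map (fun t => (t.2.1, t.2.2))

-- ===== PRECONDITION & SPEC =====
def Spec_get_strings_and_instances_py (strings : List String) (out : List (String × Int)) : Prop := out = get_strings_and_instances_py_alt strings
instance (strings : List String) (out : List (String × Int)) : Decidable (Spec_get_strings_and_instances_py strings out) := by unfold Spec_get_strings_and_instances_py; infer_instance

-- ===== CLAIM (what is proved, stated in full; the proofs are below) =====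
def Claim_equal_get_strings_and_instances_py : Prop := ∀ (strings : List String), Dom_get_strings_and_instances_py strings → Spec_get_strings_and_instances_py strings (get_strings_and_instances_py strings)

-- ===== LEMMAS AND PROOFS =====

-- Canonical result as triples (position, string, prior-occurrence count);
-- `pre` is the already-processed prefix.
def pvCanon (pre l : List String) : List (Int × String × Int) :=
  match l with
  | [] => []
  | s :: t => ((pre.length : Int), s, (pre.count s : Int)) :: pvCanon (pre ++ [s]) t

-- A's loop computes the projection of pvCanon.
theorem pvA_loop (l : List String) : ∀ (pre : List String) (d : PySem.Dict String Int)
    (res : List (String × Int)) (_ : ∀ v, d.getD v 0 = (pre.count v : Int)),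
    (l.foldl
      (fun (st : PySem.Dict String Int × List (String × Int)) s =>
        let d0 := st.1
        let d1 := if (d0.get? s).isNone then d0.insert s 0 else d0
        let d2 := d1.insert s (d1.getD s 0 + 1)
        (d2, st.2 ++ [(s, d2.getD s 0 - 1)]))
      (d, res)).2 = res ++ (pvCanon pre l).map (fun t => t.2) := by
  induction l with
  | nil => intro pre d res hd; simp [pvCanon]
  | cons s t ih =>
    intro pre d res hd
    have h1 : ∀ v, (if (d.get? s).isNone then d.insert s 0 else d).getD v 0 = d.getD v 0 := by
      intro v
      cases hg : d.get? s with
      | none =>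
        simp only [Option.isNone_none, if_pos]
        rw [PySem.Dict.getD_insert]
        split_ifs with hv
        · subst hv; simp [PySem.Dict.getD_eq_get?_getD, hg]
        · rfl
      | some w => simp only [Option.isNone_some, Bool.false_eq_true, if_neg, not_false_iff]
    have h2 : ∀ v, ((if (d.get? s).isNone then d.insert s 0 else d).insert s
        ((if (d.get? s).isNone then d.insert s 0 else d).getD s 0 + 1)).getD v 0
        = ((pre ++ [s]).count v : Int) := by
      intro v
      rw [PySem.Dict.getD_insert, h1, h1, hd, hd]
      by_cases hv : v = s
      · subst hv
        simp [List.count_append]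
      · have hc : List.count v [s] = 0 := by
          simp [Ne.symm hv]
        simp [List.count_append, hc, hv]
    simp only [List.foldl_cons]
    rw [ih (pre ++ [s]) _ _ h2]
    simp only [pvCanon, List.map_cons, List.append_assoc, List.cons_append, List.nil_append]
    congr 3
    rw [h2 s]
    simp [List.count_append]

-- fst components of pvCanon are at least pre.length.
theorem pvCanon_fst_ge (l : List String) : ∀ (pre : List String) (t : Int × String × Int),
    t ∈ pvCanon pre l → (pre.length : Int) ≤ t.1 := by
  induction l with
  | nil => intro pre t ht; simp [pvCanon] at ht
  | cons s rest ih =>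
    intro pre t ht
    simp only [pvCanon, List.mem_cons] at ht
    rcases ht with h | h
    · subst h; simp
    · have := ih (pre ++ [s]) t h
      simp at this; omega

-- fst components of pvCanon are strictly increasing.
theorem pvCanon_pairwise (l : List String) : ∀ (pre : List String),
    (pvCanon pre l).Pairwise (fun a b => a.1 < b.1) := by
  induction l with
  | nil => intro pre; simp [pvCanon]
  | cons s rest ih =>
    intro pre
    simp only [pvCanon]
    refine List.Pairwise.cons ?_ (ih (pre ++ [s]))
    intro t ht
    have := pvCanon_fst_ge rest (pre ++ [s]) t ht
    simp at this ⊢; omega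

-- Everything in pvCanon pre l has its string in l.
theorem pvCanon_snd_mem (l : List String) : ∀ (pre : List String) (t : Int × String × Int),
    t ∈ pvCanon pre l → t.2.1 ∈ l := by
  induction l with
  | nil => intro pre t ht; simp [pvCanon] at ht
  | cons s rest ih =>
    intro pre t ht
    simp only [pvCanon, List.mem_cons] at ht
    rcases ht with h | h
    · subst h; simp
    · exact List.mem_cons_of_mem _ (ih (pre ++ [s]) t h)

-- Filtering pvCanon by a fixed string s gives exactly B's ranked group for s.
theorem pvCanon_filter (s : String) (l : List String) : ∀ (pre : List String),
    (pvCanon pre l).filter (fun t => t.2.1 == s)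
      = (PySem.List.enumerate
          (((PySem.List.enumerate l (pre.length : Int)).filter (fun p => p.2 == s)).map (fun p => p.1))
          ((pre.count s : Int))).map (fun q => (q.2, s, q.1)) := by
  induction l with
  | nil => intro pre; simp [pvCanon, PySem.List.enumerate_nil]
  | cons x rest ih =>
    intro pre
    simp only [pvCanon, PySem.List.enumerate_cons, List.filter_cons]
    by_cases hx : x = s
    · subst hx
      simp only [beq_self_eq_true, if_pos]
      rw [List.map_cons, PySem.List.enumerate_cons, List.map_cons]
      have hlen : ((pre ++ [x]).length : Int) = (pre.length : Int) + 1 := by simp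
      have hcnt : ((pre ++ [x]).count x : Int) = (pre.count x : Int) + 1 := by
        simp [List.count_append]
      rw [ih (pre ++ [x])]
      rw [hlen, hcnt]
    · have hbx : (x == s) = false := by simp [hx]
      simp only [hbx, Bool.false_eq_true, if_neg, not_false_iff]
      rw [ih (pre ++ [x])]
      have hlen : ((pre ++ [x]).length : Int) = (pre.length : Int) + 1 := by simp
      have hcnt : ((pre ++ [x]).count s : Int) = (pre.count s : Int) := by
        have : List.count s [x] = 0 := List.count_eq_zero.mpr (by simp [Ne.symm hx])
        simp [List.count_append, this]
      rw [hlen, hcnt]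

-- The grouping pass: lookups in the built dict give the position lists.
theorem pvGroups_getD (l : List String) : ∀ (st : Int) (d : PySem.Dict String (List Int)) (v : String),
    ((PySem.List.enumerate l st).foldl
        (fun d p => d.modify p.2 [] (fun ps => ps ++ [p.1])) d).getD v []
    = d.getD v [] ++ ((PySem.List.enumerate l st).filter (fun p => p.2 == v)).map (fun p => p.1) := by
  induction l with
  | nil => intro st d v; simp [PySem.List.enumerate_nil]
  | cons x rest ih =>
    intro st d v
    rw [PySem.List.enumerate_cons]
    simp only [List.foldl_cons, List.filter_cons]
    rw [ih (st + 1)]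
    rw [PySem.Dict.getD_modify]
    by_cases hv : v = x
    · subst hv; simp
    · have hb : (x == v) = false := by simp [Ne.symm hv]
      simp [hv, hb]

-- The grouping pass: the built dict's keys are the distinct strings in first-occurrence order.
theorem pvGroups_keys (l : List String) : ∀ (st : Int) (d : PySem.Dict String (List Int)),
    ((PySem.List.enumerate l st).foldl
        (fun d p => d.modify p.2 [] (fun ps => ps ++ [p.1])) d).keys
    = l.foldl (fun (ks : List String) x => if ks.contains x then ks else ks ++ [x]) d.keys := by
  induction l with
  | nil => intro st d; simp [PySem.List.enumerate_nil]
  | cons x rest ih =>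
    intro st d
    rw [PySem.List.enumerate_cons]
    simp only [List.foldl_cons]
    rw [ih (st + 1)]
    congr 1
    rw [PySem.Dict.keys_modify]
    by_cases hc : d.contains x = true
    · rw [PySem.Dict.keys_insert_of_contains d _ hc]
      have hm : x ∈ d.keys := (PySem.Dict.contains_iff_mem_keys d x).mp hc
      simp [hm]
    · have hc' : d.contains x = false := by simpa using hc
      rw [PySem.Dict.keys_insert_of_not_contains d _ hc']
      have hm : x ∉ d.keys := fun hm => hc ((PySem.Dict.contains_iff_mem_keys d x).mpr hm)
      simp [hm]

-- Any list whose keys all lie in a Nodup key list is a permutation of its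
-- concatenated per-key filters.
theorem pvPerm_groups (ks : List String) : ∀ (ys : List (Int × String × Int)),
    (∀ t ∈ ys, t.2.1 ∈ ks) → ks.Nodup →
    ys.Perm (ks.flatMap (fun s => ys.filter (fun t => t.2.1 == s))) := by
  induction ks with
  | nil =>
    intro ys hmem _
    cases ys with
    | nil => simp
    | cons y t => exact absurd (hmem y (by simp)) (by simp)
  | cons k ks' ih =>
    intro ys hmem hnd
    simp only [List.flatMap_cons]
    have hsplit : ys.Perm (ys.filter (fun t => t.2.1 == k) ++ ys.filter (fun t => !(t.2.1 == k))) := by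
      exact (List.filter_append_perm (fun t => t.2.1 == k) ys).symm
    refine hsplit.trans (List.Perm.append_left _ ?_)
    have hmem' : ∀ t ∈ ys.filter (fun t => !(t.2.1 == k)), t.2.1 ∈ ks' := by
      intro t ht
      rw [List.mem_filter] at ht
      have := hmem t ht.1
      simp at ht
      rcases List.mem_cons.mp this with h | h
      · exact absurd h ht.2
      · exact h
    have hperm := ih (ys.filter (fun t => !(t.2.1 == k))) hmem' (List.Nodup.of_cons hnd)
    refine hperm.trans (List.Perm.of_eq ?_)
    apply List.flatMap_congr
    intro s hs
    have hks : s ≠ k := by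
      intro h; subst h; exact (List.nodup_cons.mp hnd).1 hs
    rw [List.filter_filter]
    apply List.filter_congr
    intro t _
    by_cases h : t.2.1 = s
    · simp [h, hks]
    · simp [h]

-- ===== VERDICT (by name: the statement is the Claim_ definition above) =====
theorem get_strings_and_instances_py_spec : Claim_equal_get_strings_and_instances_py := by
  intro strings _
  unfold Spec_get_strings_and_instances_py get_strings_and_instances_py get_strings_and_instances_py_alt
  rw [pvA_loop strings [] PySem.Dict.empty [] (by intro v; simp)]
  simp only [List.nil_append]
  have hkeys :
      ((PySem.List.enumerate strings).foldl
          (fun (d : PySem.Dict String (List Int)) p => d.modify p.2 [] (fun ps => ps ++ [p.1]))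
          PySem.Dict.empty).keys = PySem.List.dedup strings := by
    rw [pvGroups_keys strings 0 PySem.Dict.empty, PySem.Dict.keys_empty]
    rfl
  have hgetD : ∀ s : String,
      ((PySem.List.enumerate strings).foldl
          (fun (d : PySem.Dict String (List Int)) p => d.modify p.2 [] (fun ps => ps ++ [p.1]))
          PySem.Dict.empty).getD s []
        = List.map (fun p => p.1) (List.filter (fun p => p.2 == s) (PySem.List.enumerate strings)) := by
    intro s
    rw [pvGroups_getD strings 0 PySem.Dict.empty s, PySem.Dict.getD_empty]
    rfl
  have hinner : ∀ (s : String) (acc : List (Int × String × Int)),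
      List.foldl (fun (a : List (Int × String × Int)) (q : Int × Int) => a ++ [(q.2, s, q.1)]) acc
        (PySem.List.enumerate
          (List.map (fun p => p.1) (List.filter (fun p => p.2 == s) (PySem.List.enumerate strings))))
      = acc ++ (pvCanon [] strings).filter (fun t => t.2.1 == s) := by
    intro s acc
    rw [pvCanon_filter s strings []]
    simp only [List.length_nil, Nat.cast_zero, List.count_nil]
    rw [PySem.List.foldl_append_eq_flatMap (fun (q : Int × Int) => [(q.2, s, q.1)]),
        ← List.map_eq_flatMap]
  have htagged :
      ((PySem.List.enumerate strings).foldl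
          (fun (d : PySem.Dict String (List Int)) p => d.modify p.2 [] (fun ps => ps ++ [p.1]))
          PySem.Dict.empty).keys.foldl
        (fun (acc : List (Int × String × Int)) s =>
          List.foldl (fun a (q : Int × Int) => a ++ [(q.2, s, q.1)]) acc
            (PySem.List.enumerate
              (((PySem.List.enumerate strings).foldl
                  (fun (d : PySem.Dict String (List Int)) p => d.modify p.2 [] (fun ps => ps ++ [p.1]))
                  PySem.Dict.empty).getD s [])))
        []
      = (PySem.List.dedup strings).flatMap
          (fun s => (pvCanon [] strings).filter (fun t => t.2.1 == s)) := by
    rw [hkeys]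
    rw [PySem.List.foldl_congr_mem (PySem.List.dedup strings) _
          (fun (acc : List (Int × String × Int)) s =>
            acc ++ (pvCanon [] strings).filter (fun t => t.2.1 == s)) []
          (fun acc s _ => by rw [hgetD s]; exact hinner s acc)]
    rw [PySem.List.foldl_append_eq_flatMap]
    simp
  rw [htagged]
  have hperm : (pvCanon [] strings).Perm
      ((PySem.List.dedup strings).flatMap
        (fun s => (pvCanon [] strings).filter (fun t => t.2.1 == s))) := by
    apply pvPerm_groups
    · intro t ht
      rw [PySem.List.mem_dedup]
      exact pvCanon_snd_mem strings [] t ht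
    · exact PySem.List.nodup_dedup strings
  rw [PySem.List.sorted_eq_of_perm_of_pairwise_lt _ (pvCanon [] strings) (fun t => t.1)
        hperm (pvCanon_pairwise strings [])]
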